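-- pv_equiv track=rewrite | github.com/xg416/TMT | code/test_TMT_static.py | split_to_patches
-- ===== SOURCE A (Python) =====
-- def split_to_patches(h, w, s):
--     nh = h // s + 1
--     nw = w // s + 1
--     ol_h = int((nh * s - h) / (nh - 1))
--     ol_w = int((nw * s - w) / (nw - 1))
--     h_start = 0
--     w_start = 0
--     hpos = [h_start]
--     wpos = [w_start]
--     for i in range(1, nh):
--         h_start = hpos[-1] + s - ol_h
--         if h_start+s > h:
--             h_start = h-s
--         hpos.append(h_start)
--     for i in range(1, nw):
--         w_start = wpos[-1] + s - ol_w
--         if w_start+s > w: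
--             w_start = w-s
--         wpos.append(w_start)
--     return hpos, wpos
-- ===== SOURCE B (Python) =====
-- def split_to_patches(h, w, s):
--     nh = h // s + 1
--     nw = w // s + 1
--     ol_h = int((nh * s - h) / (nh - 1))
--     ol_w = int((nw * s - w) / (nw - 1))
--     hpos = [0] + [min(i * (s - ol_h), h - s) for i in range(1, nh)]
--     wpos = [0] + [min(i * (s - ol_w), w - s) for i in range(1, nw)]
--     return hpos, wpos
-- ===== Notes on version B (the rewrite author's own statement) =====
-- stated objective: simpler
-- what changed: Replaces the two stateful accumulate-and-clamp loops (running h_start/w_start with a sticky clamp) by closed-form comprehensions [0] + [min(i*(s-ol), dim-s) ...], valid because the step s-ol is non-negative for positive patch size; no running state is kept.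
-- outside the precondition, e.g. on split_to_patches(90, -79, -30): A returns ([0], [0, -49, -74]), B returns ([0], [0, -49, -50])
import Mathlib
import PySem

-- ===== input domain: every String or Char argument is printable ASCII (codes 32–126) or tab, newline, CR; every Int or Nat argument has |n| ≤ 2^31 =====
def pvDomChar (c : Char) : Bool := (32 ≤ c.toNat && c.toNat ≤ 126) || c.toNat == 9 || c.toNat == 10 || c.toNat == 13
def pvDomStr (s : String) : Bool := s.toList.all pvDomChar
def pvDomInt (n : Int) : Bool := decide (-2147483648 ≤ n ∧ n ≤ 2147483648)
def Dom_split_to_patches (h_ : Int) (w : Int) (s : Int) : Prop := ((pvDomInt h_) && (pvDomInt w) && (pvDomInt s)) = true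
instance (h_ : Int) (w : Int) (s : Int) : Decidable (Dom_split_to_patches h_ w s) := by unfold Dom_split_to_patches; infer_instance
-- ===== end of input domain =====

-- B replaces A's two stateful accumulate-and-clamp loops by closed-form comprehensions
-- [0] + [min(i*(s-ol), dim-s)]: simpler, no running state (objective: simpler).


-- ===== PORT A =====
-- one iteration of A's loop body: read pos[-1], step by s - ol, clamp to dim - s, append
def pvClampStep (s dim ol : Int) (pos : List Int) : List Int :=
  let start := ((PySem.List.pyGet? pos (-1)).getD 0) + s - ol   -- pos is never empty, so pyGet? never misses
  let start := if start + s > dim then dim - s else start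
  pos ++ [start]

def split_to_patches (h_ : Int) (w : Int) (s : Int) : List Int × List Int :=
  let nh := PySem.Int.floordiv h_ s + 1
  let nw := PySem.Int.floordiv w s + 1
  -- int((nh*s-h)/(nh-1)): float divide then truncate toward zero; on Dom (|ints| ≤ 2^31) the
  -- float quotient truncates to exactly Int.tdiv, so this port is exact on Dom
  let ol_h := Int.tdiv (nh * s - h_) (nh - 1)
  let ol_w := Int.tdiv (nw * s - w) (nw - 1)
  let hpos := (PySem.List.pyRange 1 nh 1).foldl (fun acc _ => pvClampStep s h_ ol_h acc) [0]
  let wpos := (PySem.List.pyRange 1 nw 1).foldl (fun acc _ => pvClampStep s w ol_w acc) [0]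
  (hpos, wpos)

-- ===== PORT B =====
def split_to_patches_alt (h_ : Int) (w : Int) (s : Int) : List Int × List Int :=
  let nh := PySem.Int.floordiv h_ s + 1
  let nw := PySem.Int.floordiv w s + 1
  let ol_h := Int.tdiv (nh * s - h_) (nh - 1)   -- same int((...)/(...)) expression as A; exact on Dom
  let ol_w := Int.tdiv (nw * s - w) (nw - 1)
  ([0] ++ (PySem.List.pyRange 1 nh 1).map (fun i => min (i * (s - ol_h)) (h_ - s)),
   [0] ++ (PySem.List.pyRange 1 nw 1).map (fun i => min (i * (s - ol_w)) (w - s)))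

-- ===== PRECONDITION & SPEC =====
-- Pre_ is A's return domain (h//s ≠ 0 ≠ w//s, else ZeroDivisionError) minus the inputs with negative
-- patch size s on which a clamp loop runs more than once (h//s ≥ 2 or w//s ≥ 2): there A's backward loop keeps
-- stepping past dim - s, an accident of its sticky clamp that B's closed form does not mimic.
def Pre_split_to_patches (h_ : Int) (w : Int) (s : Int) : Prop :=
  PySem.Int.floordiv h_ s ≠ 0 ∧ PySem.Int.floordiv w s ≠ 0 ∧
    (0 < s ∨ (PySem.Int.floordiv h_ s ≤ 1 ∧ PySem.Int.floordiv w s ≤ 1))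
instance (h_ : Int) (w : Int) (s : Int) : Decidable (Pre_split_to_patches h_ w s) := by unfold Pre_split_to_patches; infer_instance
def pvWitness_split_to_patches : Int × Int × Int := (7, 10, 3)

def Spec_split_to_patches (h_ : Int) (w : Int) (s : Int) (out : List Int × List Int) : Prop := out = split_to_patches_alt h_ w s
instance (h_ : Int) (w : Int) (s : Int) (out : List Int × List Int) : Decidable (Spec_split_to_patches h_ w s out) := by unfold Spec_split_to_patches; infer_instance

-- ===== CLAIM (what is proved, stated in full; the proofs are below) =====
def Claim_equal_split_to_patches : Prop := ∀ (h_ : Int) (w : Int) (s : Int), Dom_split_to_patches h_ w s → Pre_split_to_patches h_ w s → Spec_split_to_patches h_ w s (split_to_patches h_ w s)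

-- ===== LEMMAS AND PROOFS =====

-- one clamp step from the value min (k*step) d lands on min ((k+1)*step) d, for 0 ≤ step, 0 ≤ d
lemma pvClamp_min (step d : Int) (k : Int) (hstep : 0 ≤ step) (hd : 0 ≤ d) :
    (if min (k * step) d + step > d then d else min (k * step) d + step)
      = min ((k + 1) * step) d := by
  have hK : (k + 1) * step = k * step + step := by ring
  generalize k * step = K at *
  rw [hK]
  rcases le_total K d with h1 | h1 <;> rcases le_total (K + step) d with h2 | h2 <;>
    simp [min_def] <;> omega

-- A's fold over pyRange 1 (1+k) equals B's min closed form mapped over pyRange 0 (1+k)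
lemma pvLoop_eq (s dim ol : Int) (hol : ol ≤ s) (hd : s ≤ dim) (k : Nat) :
    (PySem.List.pyRange 1 (1 + (k : Int)) 1).foldl (fun acc _ => pvClampStep s dim ol acc) [0]
      = (PySem.List.pyRange 0 (1 + (k : Int)) 1).map (fun i => min (i * (s - ol)) (dim - s)) := by
  induction k with
  | zero =>
      rw [PySem.List.pyRange_one_eq_nil (by omega), show (1 : Int) + ((0:Nat):Int) = 0 + 1 by norm_num,
        PySem.List.pyRange_one_singleton]
      simp [min_def]
      omega
  | succ n ih =>
      have h1 : (1 : Int) + (n + 1 : Nat) = (1 + (n : Int)) + 1 := by push_cast; ring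
      rw [h1, PySem.List.pyRange_one_succ_right (by omega) (b := 1 + (n : Int)),
        PySem.List.pyRange_one_succ_right (by omega) (b := 1 + (n : Int)),
        List.foldl_append, ih, List.map_append]
      -- peel the last element of B's prefix list to read pos[-1]
      have h2 : (1 : Int) + (n : Int) = (n : Int) + 1 := by ring
      rw [h2, PySem.List.pyRange_one_succ_right (by omega) (b := (n : Int)), List.map_append]
      simp only [List.foldl_cons, List.foldl_nil, List.map_cons, List.map_nil]
      rw [pvClampStep, List.append_assoc]
      simp only [PySem.List.pyGet?_neg_one_append_singleton, Option.getD_some]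
      have := pvClamp_min (s - ol) (dim - s) n (by omega) (by omega)
      rw [← List.append_assoc]
      congr 2
      rw [← this]
      generalize min ((n : Int) * (s - ol)) (dim - s) = m
      split_ifs <;> omega

-- overlap is between 0 and s on the tiling domain
lemma pvOl_bounds (dim s : Int) (hs : 0 < s) (hds : s ≤ dim) :
    0 ≤ Int.tdiv ((PySem.Int.floordiv dim s + 1) * s - dim) (PySem.Int.floordiv dim s + 1 - 1)
    ∧ Int.tdiv ((PySem.Int.floordiv dim s + 1) * s - dim) (PySem.Int.floordiv dim s + 1 - 1) ≤ s := by
  set q := PySem.Int.floordiv dim s with hq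
  have hq1 : 1 ≤ q := by
    rw [hq, PySem.Int.le_floordiv_iff_mul_le hs]
    omega
  have hmul : q * s + PySem.Int.mod dim s = dim := PySem.Int.floordiv_mul_add_mod dim s
  have hmod1 : 0 ≤ PySem.Int.mod dim s := by
    rw [PySem.Int.mod_eq_emod_of_pos hs]; exact Int.emod_nonneg _ (by omega)
  have hmod2 : PySem.Int.mod dim s < s := by
    rw [PySem.Int.mod_eq_emod_of_pos hs]; exact Int.emod_lt_of_pos _ hs
  have hx1 : 0 < (q + 1) * s - dim := by nlinarith
  have hx2 : (q + 1) * s - dim ≤ s := by nlinarith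
  constructor
  · exact Int.tdiv_nonneg (by omega) (by omega)
  · calc Int.tdiv ((q + 1) * s - dim) (q + 1 - 1)
        ≤ (q + 1) * s - dim := by
          rw [Int.tdiv_eq_ediv_of_nonneg (by omega)]
          exact Int.ediv_le_self _ (by omega)
      _ ≤ s := hx2

-- one dimension: A's loop equals B's closed form, for positive s and dim//s ≠ 0
lemma pvDim_eq (dim s : Int) (hcase : 0 < s ∨ PySem.Int.floordiv dim s ≤ 1) :
    (PySem.List.pyRange 1 (PySem.Int.floordiv dim s + 1) 1).foldl
        (fun acc _ => pvClampStep s dim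
          (Int.tdiv ((PySem.Int.floordiv dim s + 1) * s - dim) (PySem.Int.floordiv dim s + 1 - 1)) acc) [0]
      = [0] ++ (PySem.List.pyRange 1 (PySem.Int.floordiv dim s + 1) 1).map
          (fun i => min (i * (s - Int.tdiv ((PySem.Int.floordiv dim s + 1) * s - dim)
            (PySem.Int.floordiv dim s + 1 - 1))) (dim - s)) := by
  by_cases hneg : PySem.Int.floordiv dim s < 1
  · -- dim // s ≤ 0: the loop range is empty on both sides, both values are [0]
    rw [PySem.List.pyRange_one_eq_nil (by omega)]
    simp
  by_cases hone : PySem.Int.floordiv dim s = 1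
  · -- dim // s = 1: the loop runs once, and A's first clamped value is exactly the min
    have e2 : PySem.Int.floordiv dim s + 1 = 1 + 1 := by omega
    rw [e2, PySem.List.pyRange_one_singleton]
    generalize Int.tdiv ((1 + 1) * s - dim) (1 + 1 - 1) = ol
    simp [pvClampStep, PySem.List.pyGet?_neg_one, min_def]
    split_ifs <;> omega
  · have hq1 : 1 ≤ PySem.Int.floordiv dim s := by omega
    have hs : 0 < s := by rcases hcase with h | h; exact h; omega
    have hds : s ≤ dim := by
      have := (PySem.Int.le_floordiv_iff_mul_le (a := dim) (q := 1) hs).mp hq1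
      omega
    obtain ⟨ho1, ho2⟩ := pvOl_bounds dim s hs hds
    set ol := Int.tdiv ((PySem.Int.floordiv dim s + 1) * s - dim) (PySem.Int.floordiv dim s + 1 - 1) with hol
    have ek : PySem.Int.floordiv dim s + 1 = 1 + ((PySem.Int.floordiv dim s).toNat : Int) := by omega
    rw [ek, pvLoop_eq s dim ol (by omega) hds,
      PySem.List.pyRange_one_cons (a := 0) (by omega), List.map_cons]
    simp [min_def]
    omega

-- ===== VERDICT (by name: the statement is the Claim_ definition above) =====
theorem split_to_patches_spec : Claim_equal_split_to_patches := by
  intro h_ w s _ hpre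
  obtain ⟨hqh, hqw, hcase⟩ := hpre
  unfold Spec_split_to_patches split_to_patches split_to_patches_alt
  simp only
  rw [pvDim_eq h_ s (by tauto), pvDim_eq w s (by tauto)]
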